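-- pv_equiv track=rewrite | github.com/Dongyeon1201/CodingTest_Study_Python | programmers/2개이하로같은비트.py | solution
-- ===== SOURCE A (Python) =====
-- def solution(numbers):
--
--     answer = []
--
--     for number in numbers:
--
--         # 짝수일때는 최하단 비트가 0이기 때문에, 1을 더한 다음 홀수가 조건에 맞는 답이다.
--         if number % 2 == 0:
--             answer.append(number + 1)
--
--         # 홀수일 경우, 최하단부터 가장 먼저 나온 '0'비트를 찾은 후, right 비트를 1증가시킨다.
--         # 여기서 가장 최하단쪽에서부터 찾는 이유는, 조건을 만족하는 숫자중 가장 작은 수가 필요하기 때문이다.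
--         # right 비트를 1 증가되면 해당 비트는 0으로 변하고, 자연스럽게 기존의 '0' 비트는 1로 변한다.
--         # 이로써 조건에 맞게된다.
--         else:
--             bin_num = list("0" + format(number, "b"))
--
--             for i in range(2, len(bin_num) + 1):
--                 if bin_num[-i] == "0":
--                     bin_num[-i], bin_num[-i + 1] = bin_num[-i + 1], bin_num[-i]
--                     break
--
--             answer.append(int("".join(bin_num), 2))
--
--     return answer
-- ===== SOURCE B (Python) =====
-- def _next(n):
--     if n % 2 == 0:
--         return n + 1
--     low = ~n & (n + 1)          # lowest zero bit of n
--     return n + (low >> 1)       # set it, clear the bit below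
--
--
-- def solution(numbers):
--     return [_next(n) for n in numbers]
-- ===== Notes on version B (the rewrite author's own statement) =====
-- stated objective: alternative
-- what changed: Replaces the per-element binary-string construction, bit-scanning loop and re-parse with constant-time integer arithmetic: the lowest zero bit of an odd n is ~n & (n+1) and the answer is n + (that >> 1).
-- intended difference: On lists containing a negative odd element n < -1 whose magnitude is all ones (|n| = 2^k - 1), A returns n itself unchanged (its swap moves the '-' sign to the front and int() re-parses the same number), while B returns n + 1, the smallest number above n differing in at most two bits, which is what the function is for. — e.g. on solution([-3]): A returns [-3], B returns [-2]
import Mathlib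
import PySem

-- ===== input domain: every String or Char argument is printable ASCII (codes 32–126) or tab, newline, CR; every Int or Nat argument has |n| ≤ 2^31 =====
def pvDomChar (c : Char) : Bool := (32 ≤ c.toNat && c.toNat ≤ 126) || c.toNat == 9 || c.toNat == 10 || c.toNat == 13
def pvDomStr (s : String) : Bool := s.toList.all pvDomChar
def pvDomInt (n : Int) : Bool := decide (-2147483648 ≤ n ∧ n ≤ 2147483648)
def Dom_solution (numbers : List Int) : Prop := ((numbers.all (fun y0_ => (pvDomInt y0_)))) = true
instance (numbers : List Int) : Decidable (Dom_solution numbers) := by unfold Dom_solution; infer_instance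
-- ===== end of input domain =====

-- B replaces A's per-element binary-string build/scan/re-parse with the constant-time
-- bit trick n + ((~n & (n+1)) >> 1); A = B wherever A returns, except the D_ corner
-- (negative odd all-ones numbers), where A returns its input unchanged and B fixes it.

-- ===== PORT A =====
-- format(n, "b") for n ≥ 0, big-endian, no sign (format(0) is handled in fmtB)
def binChars (n : Nat) : List Char :=
  if h : n = 0 then []
  else binChars (n / 2) ++ [if n % 2 = 1 then '1' else '0']
decreasing_by exact Nat.div_lt_self (Nat.pos_of_ne_zero h) one_lt_two

-- format(number, "b"): Python prepends '-' for negative input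
def fmtB (n : Int) : List Char :=
  if n = 0 then ['0'] else if 0 < n then binChars n.toNat else '-' :: binChars (-n).toNat

-- the i-loop over negative indices bin_num[-i], ported as a structural scan over the
-- REVERSED list: positions 1,2,… of the reversed list are exactly bin_num[-2],bin_num[-3],…;
-- swap-and-break on the first '0' — exact
def scanA : List Char → List Char
  | [] => []
  | [c] => [c]
  | a :: b :: rest => if b = '0' then b :: a :: rest else a :: scanA (b :: rest)

def parseDigits (l : List Char) : Int :=
  l.foldl (fun a c => 2 * a + (if c = '1' then 1 else 0)) 0

-- int("".join(bin_num), 2): optional leading '-', then binary digits — exact on the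
-- strings A's pipeline can feed it without raising ('-' elsewhere raises: outside Pre_)
def parseBE (l : List Char) : Int :=
  if l.head? = some '-' then -(parseDigits l.tail) else parseDigits l

def oddStepA (number : Int) : Int :=
  parseBE ((scanA (('0' :: fmtB number).reverse)).reverse)

def solution (numbers : List Int) : List Int :=
  numbers.foldl
    (fun answer number =>
      if PySem.Int.mod number 2 = 0 then answer ++ [number + 1]
      else answer ++ [oddStepA number]) []

-- ===== PORT B =====
def nextNum (n : Int) : Int :=
  if PySem.Int.mod n 2 = 0 then n + 1
  else n + (PySem.Int.band (Int.not n) (n + 1)) >>> (1 : Nat)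

def solution_alt (numbers : List Int) : List Int := numbers.map nextNum

-- ===== PRECONDITION & SPEC =====
-- Pre_ excludes exactly the lists on which A raises ValueError: those containing a
-- negative odd element whose magnitude is NOT of the form 2^k - 1 (there the swap
-- leaves the '-' sign inside the digit string and int(..., 2) rejects it).
def Pre_solution (numbers : List Int) : Prop :=
  ∀ n ∈ numbers, n < 0 →
    PySem.Int.mod n 2 = 0 ∨ (-n).toNat &&& ((-n).toNat + 1) = 0
instance (numbers : List Int) : Decidable (Pre_solution numbers) := by
  unfold Pre_solution; infer_instance

def pvWitness_solution : List Int := [2, 7, -4, 0, 2147483647]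

-- On lists containing a negative odd element n < -1 with all-ones magnitude (|n| = 2^k - 1)
-- A returns n itself unchanged (the '-' is swapped to the front and int() re-parses the
-- same number), while B returns n + 1, the smallest number above n differing in ≤ 2 bits —
-- the function's purpose.
def D_solution (numbers : List Int) : Prop :=
  ∃ n ∈ numbers, n < -1 ∧ PySem.Int.mod n 2 ≠ 0 ∧ (-n).toNat &&& ((-n).toNat + 1) = 0
instance (numbers : List Int) : Decidable (D_solution numbers) := by
  unfold D_solution; infer_instance

def Spec_solution (numbers : List Int) (out : List Int) : Prop :=
  ¬ D_solution numbers → out = solution_alt numbers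
instance (numbers : List Int) (out : List Int) : Decidable (Spec_solution numbers out) := by unfold Spec_solution; infer_instance

def pvDiffWitness_solution : List Int := [-3]
def pvDiffWitnessOut_solution : (List Int) × (List Int) := ([-3], [-2])

-- ===== CLAIM (what is proved, stated in full; the proofs are below) =====
def Claim_unchanged_solution : Prop := ∀ (numbers : List Int), Dom_solution numbers → Pre_solution numbers → Spec_solution numbers (solution numbers)
def Claim_changed_solution : Prop := Dom_solution (pvDiffWitness_solution) ∧ Pre_solution (pvDiffWitness_solution) ∧ D_solution (pvDiffWitness_solution) ∧ solution (pvDiffWitness_solution) = pvDiffWitnessOut_solution.1 ∧ solution_alt (pvDiffWitness_solution) = pvDiffWitnessOut_solution.2 ∧ pvDiffWitnessOut_solution.1 ≠ pvDiffWitnessOut_solution.2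
def Claim_exact_solution : Prop := ∀ (numbers : List Int), Dom_solution numbers → Pre_solution numbers → D_solution numbers → solution numbers ≠ solution_alt numbers

-- ===== LEMMAS AND PROOFS =====

-- A's per-element step, and A as a map (unconditional reshaping of the foldl)
def stepA (n : Int) : Int :=
  if PySem.Int.mod n 2 = 0 then n + 1 else oddStepA n

theorem solution_foldl (l : List Int) (acc : List Int) :
    l.foldl (fun answer number =>
      if PySem.Int.mod number 2 = 0 then answer ++ [number + 1]
      else answer ++ [oddStepA number]) acc = acc ++ l.map stepA := by
  induction l generalizing acc with
  | nil => simp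
  | cons x xs ih =>
    simp only [List.foldl_cons, List.map_cons]
    rw [show (if PySem.Int.mod x 2 = 0 then acc ++ [x + 1] else acc ++ [oddStepA x]) =
          acc ++ [stepA x] from by unfold stepA; split <;> rfl, ih]
    simp

theorem solution_eq_map (l : List Int) : solution l = l.map stepA := by
  unfold solution
  simpa using solution_foldl l []

-- little-endian bits of n (proof-side mirror of (binChars n).reverse)
def bitsLE (n : Nat) : List Char :=
  if h : n = 0 then []
  else (if n % 2 = 1 then '1' else '0') :: bitsLE (n / 2)
decreasing_by exact Nat.div_lt_self (Nat.pos_of_ne_zero h) one_lt_two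

-- little-endian value (proof-side mirror of parseDigits ∘ reverse)
def parseLE (l : List Char) : Int :=
  l.foldr (fun c a => 2 * a + (if c = '1' then 1 else 0)) 0

theorem binChars_reverse (n : Nat) : (binChars n).reverse = bitsLE n := by
  induction n using Nat.strong_induction_on with
  | _ n ih =>
    rw [binChars, bitsLE]
    by_cases h : n = 0
    · simp [h]
    · simp only [h, dite_false, List.reverse_append, List.reverse_cons, List.reverse_nil]
      simp [ih (n / 2) (Nat.div_lt_self (Nat.pos_of_ne_zero h) one_lt_two)]

theorem parseDigits_reverse (l : List Char) : parseDigits l.reverse = parseLE l := by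
  simp [parseDigits, parseLE, List.foldl_reverse]

theorem parseLE_append_zero (l : List Char) : parseLE (l ++ ['0']) = parseLE l := by
  simp [parseLE, List.foldr_append]

theorem parseLE_bitsLE (n : Nat) : parseLE (bitsLE n) = (n : Int) := by
  induction n using Nat.strong_induction_on with
  | _ n ih =>
    rw [bitsLE]
    by_cases h : n = 0
    · simp [h, parseLE]
    · simp only [h, dite_false, parseLE, List.foldr_cons]
      have := ih (n / 2) (Nat.div_lt_self (Nat.pos_of_ne_zero h) one_lt_two)
      simp only [parseLE] at this
      rw [this]
      by_cases hp : n % 2 = 1 <;> simp [hp] <;> omega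

-- the scan never invents characters
theorem scanA_subset (t : List Char) : ∀ (a c : Char), c ∈ scanA (a :: t) → c ∈ a :: t := by
  induction t with
  | nil => intro a c hc; simpa [scanA] using hc
  | cons b r ih =>
    intro a c hc
    by_cases hb : b = '0'
    · subst hb
      simp [scanA] at hc ⊢; tauto
    · simp only [scanA, if_neg hb] at hc
      rcases List.mem_cons.mp hc with h | h
      · simp [h]
      · have := ih b c h
        simp at this ⊢; tauto

theorem bitsLE_digits (n : Nat) : ∀ c ∈ bitsLE n, c = '0' ∨ c = '1' := by
  induction n using Nat.strong_induction_on with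
  | _ n ih =>
    intro c hc
    rw [bitsLE] at hc
    by_cases h : n = 0
    · simp [h] at hc
    · simp only [h, dite_false, List.mem_cons] at hc
      rcases hc with h1 | h1
      · subst h1; split <;> simp
      · exact ih (n / 2) (Nat.div_lt_self (Nat.pos_of_ne_zero h) one_lt_two) c h1

theorem parseBE_no_dash (l : List Char) (h : '-' ∉ l) : parseBE l = parseDigits l := by
  cases l with
  | nil => rfl
  | cons c t =>
    have : ¬ c = '-' := fun hc => h (by simp [hc])
    simp [parseBE, this]

-- bit recurrences for &&&, from Nat.bitwise_bit
theorem and_succ_self_even (j : Nat) : (2 * j + 1) &&& (2 * j) = 2 * j := by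
  have := Nat.bitwise_bit (f := and) (a := true) (m := j) (b := false) (n := j)
  simp only [Nat.bit, cond_true, cond_false] at this
  have hself : Nat.bitwise and j j = j := by
    rw [show Nat.bitwise and j j = j &&& j from rfl, Nat.and_self]
  rw [hself] at this
  simpa [HAnd.hAnd, AndOp.and, Nat.land] using this

theorem and_even_odd (a b : Nat) : (2 * a) &&& (2 * b + 1) = 2 * (a &&& b) := by
  have := Nat.bitwise_bit (f := and) (a := false) (m := a) (b := true) (n := b)
  simp only [Nat.bit, cond_true, cond_false] at this
  simpa [HAnd.hAnd, AndOp.and, Nat.land] using this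

-- the arithmetic meaning of ~n & (n+1) on nonnegative n, as (k+1) - ((k+1) &&& k)
def lowZero (k : Nat) : Nat := (k + 1) - ((k + 1) &&& k)

theorem lowZero_even (m : Nat) (hm : m % 2 = 0) : lowZero m = 1 := by
  obtain ⟨j, rfl⟩ : ∃ j, m = 2 * j := ⟨m / 2, by omega⟩
  have h1 : (2 * j + 1) &&& (2 * j) = 2 * j := and_succ_self_even j
  have h2 : 2 * j + 1 &&& 2 * j ≤ 2 * j + 1 := Nat.and_le_left
  simp only [lowZero]; omega

theorem lowZero_double (m : Nat) : lowZero (2 * m + 1) = 2 * lowZero m := by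
  have h1 : (2 * m + 1 + 1) &&& (2 * m + 1) = 2 * ((m + 1) &&& m) := by
    rw [show 2 * m + 1 + 1 = 2 * (m + 1) by ring]; exact and_even_odd (m + 1) m
  have h2 : (m + 1) &&& m ≤ m + 1 := Nat.and_le_left
  simp only [lowZero]; omega

theorem lowZero_odd_even (m : Nat) (hm : m % 2 = 1) : lowZero m % 2 = 0 := by
  obtain ⟨j, rfl⟩ : ∃ j, m = 2 * j + 1 := ⟨m / 2, by omega⟩
  rw [lowZero_double j]; omega

-- heart of the equivalence: A's scan-and-swap on the '0'-prefixed bits computes k + lowZero k / 2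
theorem scan_value (k : Nat) (hk : k % 2 = 1) :
    parseLE (scanA (bitsLE k ++ ['0'])) = (k : Int) + (lowZero k / 2 : Nat) := by
  induction k using Nat.strong_induction_on with
  | _ k ih =>
    obtain ⟨m, rfl⟩ : ∃ m, k = 2 * m + 1 := ⟨k / 2, by omega⟩
    have hb : bitsLE (2 * m + 1) = '1' :: bitsLE m := by
      rw [bitsLE]; norm_num; congr 1 <;> omega
    rw [hb]
    by_cases hm0 : m = 0
    · subst hm0
      have h0 : bitsLE 0 = [] := by rw [bitsLE]; simp
      rw [h0]
      show parseLE (scanA ['1', '0']) = (1 : Int) + ((lowZero 1 / 2 : Nat) : Int)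
      norm_num [scanA, parseLE, lowZero]
      decide
    · by_cases hme : m % 2 = 0
      · -- next bit is '0': swap and stop
        have hbm : bitsLE m = '0' :: bitsLE (m / 2) := by
          rw [bitsLE]; simp [hm0, Nat.mod_two_ne_one.mpr hme]
        rw [hbm]
        have hscan : scanA ('1' :: '0' :: (bitsLE (m / 2) ++ ['0'])) =
            '0' :: '1' :: (bitsLE (m / 2) ++ ['0']) := by simp [scanA]
        rw [show ('1' :: '0' :: bitsLE (m / 2)) ++ ['0'] =
              '1' :: '0' :: (bitsLE (m / 2) ++ ['0']) from rfl, hscan]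
        have hv : parseLE (bitsLE (m / 2) ++ ['0']) = ((m / 2 : Nat) : Int) := by
          rw [parseLE_append_zero, parseLE_bitsLE]
        simp only [parseLE, List.foldr_cons] at hv ⊢
        rw [hv, lowZero_double m, lowZero_even m hme]
        norm_num
        rw [if_neg (show ¬ '0' = '1' by decide)]
        omega
      · -- next bit is '1': A keeps scanning; induction on m
        have hm1 : m % 2 = 1 := by omega
        have hbm : bitsLE m = '1' :: bitsLE (m / 2) := by
          rw [bitsLE]; simp [hm0, hm1]
        have hscan : scanA ('1' :: (bitsLE m ++ ['0'])) = '1' :: scanA (bitsLE m ++ ['0']) := by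
          rw [hbm]; simp [scanA]
        rw [show ('1' :: bitsLE m) ++ ['0'] = '1' :: (bitsLE m ++ ['0']) from rfl, hscan]
        have hihm := ih m (by omega) hm1
        simp only [parseLE, List.foldr_cons] at hihm ⊢
        rw [hihm]
        have h2 : lowZero (2 * m + 1) = 2 * lowZero m := lowZero_double m
        have h3 : lowZero m % 2 = 0 := lowZero_odd_even m hm1
        norm_num
        omega

theorem int_not_eq (x : Int) : Int.not x = -x - 1 := by
  unfold Int.not
  cases x with
  | ofNat n => simp [Int.negSucc_eq]; ring
  | negSucc n => simp [Int.negSucc_eq]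

-- B's bit trick on a nonnegative number, reduced to lowZero
theorem band_not (k : Nat) :
    PySem.Int.band (Int.not (k : Int)) ((k : Int) + 1) = ((lowZero k : Nat) : Int) := by
  have h1 : ¬ (0 ≤ Int.not (k : Int)) := by simp only [Int.not]; omega
  have h2 : (0 : Int) ≤ (k : Int) + 1 := by omega
  simp only [PySem.Int.band, h1, h2, if_false, if_true, lowZero]
  have h3 : (-(Int.not (k : Int)) - 1).toNat = k := by simp only [Int.not]; omega
  have h4 : ((k : Int) + 1).toNat = k + 1 := by omega
  rw [h3, h4]

theorem shiftRight_natCast (x : Nat) : ((x : Int) >>> (1 : Nat)) = ((x >>> 1 : Nat) : Int) := rfl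

-- ===== the negative all-ones corner: binary of 2^k - 1 and A's behaviour there =====

theorem binChars_pow (k : Nat) : binChars (2 ^ k - 1) = List.replicate k '1' := by
  induction k with
  | zero => rw [binChars]; simp
  | succ j ih =>
    have h2 : 2 ^ (j + 1) = 2 * 2 ^ j := by ring
    have hpos : 2 ^ j ≥ 1 := Nat.one_le_two_pow
    rw [binChars]
    have hne : ¬ (2 ^ (j + 1) - 1 = 0) := by omega
    simp only [hne, dite_false]
    have hdiv : (2 ^ (j + 1) - 1) / 2 = 2 ^ j - 1 := by omega
    have hmod : (2 ^ (j + 1) - 1) % 2 = 1 := by omega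
    rw [hdiv, hmod, ih]
    simp [List.replicate_succ']

theorem scanA_replicate (k : Nat) :
    scanA (List.replicate k '1' ++ ['-', '0']) = List.replicate k '1' ++ ['0', '-'] := by
  induction k with
  | zero => simp [scanA]
  | succ j ih =>
    rw [List.replicate_succ]
    cases j with
    | zero => simp [scanA]
    | succ i =>
      rw [show (('1' :: List.replicate (i + 1) '1') ++ ['-', '0']) =
            '1' :: '1' :: (List.replicate i '1' ++ ['-', '0']) from by simp [List.replicate_succ],
        scanA]
      rw [show ('1' :: List.replicate (i + 1) '1') ++ ['0', '-'] =
            '1' :: (List.replicate (i + 1) '1' ++ ['0', '-']) from by simp]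
      rw [show ('1' :: (List.replicate i '1' ++ ['-', '0'])) =
            List.replicate (i + 1) '1' ++ ['-', '0'] from by simp [List.replicate_succ]]
      simp [ih]

theorem parseDigits_replicate_aux (k : Nat) :
    ∀ a : Int, List.foldl (fun a c => 2 * a + (if c = '1' then 1 else 0)) a
      (List.replicate k '1') = a * 2 ^ k + (2 ^ k - 1) := by
  induction k with
  | zero => intro a; simp
  | succ j ih =>
    intro a
    rw [List.replicate_succ, List.foldl_cons]
    norm_num
    rw [ih (2 * a + 1)]
    ring

theorem parseDigits_replicate (k : Nat) :
    parseDigits (List.replicate k '1') = (2 : Int) ^ k - 1 := by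
  have := parseDigits_replicate_aux k 0
  simpa [parseDigits] using this

theorem mod_neg_allones (m : Nat) (hm : m % 2 = 1) :
    PySem.Int.mod (-(m : Int)) 2 ≠ 0 := by
  intro h
  have := (PySem.Int.mod_eq_zero_iff_dvd (-(m : Int)) 2).mp h
  omega

-- A on -(2^k - 1), k ≥ 1: the '-' is swapped to the front and the value re-parses to itself
theorem stepA_allones (k : Nat) (hk : 1 ≤ k) :
    stepA (-((2 ^ k - 1 : Nat) : Int)) = -((2 ^ k - 1 : Nat) : Int) := by
  have hpos : 1 ≤ 2 ^ k := Nat.one_le_two_pow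
  have hodd : (2 ^ k - 1) % 2 = 1 := by
    have h2 : 2 ^ k % 2 = 0 := by
      cases k with
      | zero => omega
      | succ j => simp [pow_succ, Nat.mul_mod_left]
    omega
  have h3 : 2 ^ k - 1 ≠ 0 := by
    have : 2 ≤ 2 ^ k := by
      calc 2 = 2 ^ 1 := rfl
      _ ≤ 2 ^ k := Nat.pow_le_pow_right (by omega) hk
    omega
  unfold stepA
  rw [if_neg (mod_neg_allones _ hodd)]
  unfold oddStepA
  have hne : ¬ (-((2 ^ k - 1 : Nat) : Int) = 0) := by
    intro h; apply h3; omega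
  have hnpos : ¬ (0 < -((2 ^ k - 1 : Nat) : Int)) := by omega
  have htn : (-(-((2 ^ k - 1 : Nat) : Int))).toNat = 2 ^ k - 1 := by omega
  rw [fmtB, if_neg hne, if_neg hnpos, htn, binChars_pow k]
  rw [show ('0' :: '-' :: List.replicate k '1').reverse =
        List.replicate k '1' ++ ['-', '0'] from by simp]
  rw [scanA_replicate k]
  rw [show (List.replicate k '1' ++ ['0', '-']).reverse =
        '-' :: '0' :: List.replicate k '1' from by simp]
  rw [parseBE]
  simp only [List.head?_cons, List.tail_cons]
  rw [show parseDigits ('0' :: List.replicate k '1') = parseDigits (List.replicate k '1') from by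
    simp [parseDigits]]
  rw [parseDigits_replicate k]
  push_cast [hpos]
  ring

-- B on -(2^k - 1), k ≥ 2: ~n & (n+1) is 2, so B returns n + 1
theorem nextNum_allones (k : Nat) (hk : 2 ≤ k) :
    nextNum (-((2 ^ k - 1 : Nat) : Int)) = -((2 ^ k - 1 : Nat) : Int) + 1 := by
  have hpos : 4 ≤ 2 ^ k := by
    calc (4 : Nat) = 2 ^ 2 := rfl
    _ ≤ 2 ^ k := Nat.pow_le_pow_right (by omega) hk
  have hodd : (2 ^ k - 1) % 2 = 1 := by
    have h2 : 2 ^ k % 2 = 0 := by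
      cases k with
      | zero => omega
      | succ j => simp [pow_succ, Nat.mul_mod_left]
    omega
  have hand : (2 ^ k - 2) &&& (2 ^ k - 3) = 2 ^ k - 4 := by
    obtain ⟨j, rfl⟩ : ∃ j, k = j + 2 := ⟨k - 2, by omega⟩
    have hp1 : 1 ≤ 2 ^ j := Nat.one_le_two_pow
    have e1 : 2 ^ (j + 2) - 2 = 2 * (2 ^ (j + 1) - 1) := by
      have : 2 ^ (j + 2) = 2 * 2 ^ (j + 1) := by ring
      have h1 : 1 ≤ 2 ^ (j + 1) := Nat.one_le_two_pow
      omega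
    have e2 : 2 ^ (j + 2) - 3 = 2 * (2 ^ (j + 1) - 2) + 1 := by
      have : 2 ^ (j + 2) = 2 * 2 ^ (j + 1) := by ring
      have h1 : 2 ≤ 2 ^ (j + 1) := by
        calc (2 : Nat) = 2 ^ 1 := rfl
        _ ≤ 2 ^ (j + 1) := Nat.pow_le_pow_right (by omega) (by omega)
      omega
    rw [e1, e2, and_even_odd]
    have e3 : 2 ^ (j + 1) - 1 = 2 * (2 ^ j - 1) + 1 := by
      have : 2 ^ (j + 1) = 2 * 2 ^ j := by ring
      omega
    have e4 : 2 ^ (j + 1) - 2 = 2 * (2 ^ j - 1) := by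
      have : 2 ^ (j + 1) = 2 * 2 ^ j := by ring
      omega
    rw [e3, e4, and_succ_self_even]
    have : 2 ^ (j + 2) = 4 * 2 ^ j := by ring
    omega
  unfold nextNum
  rw [if_neg (mod_neg_allones _ hodd)]
  have ha : Int.not (-((2 ^ k - 1 : Nat) : Int)) = ((2 ^ k - 2 : Nat) : Int) := by
    rw [int_not_eq]
    push_cast [show 1 ≤ 2 ^ k by omega, show 2 ≤ 2 ^ k by omega]
    ring
  have hbneg : ¬ (0 ≤ -((2 ^ k - 1 : Nat) : Int) + 1) := by
    have : ((2 ^ k - 1 : Nat) : Int) = (2 ^ k : Nat) - 1 := by push_cast [show 1 ≤ 2 ^ k by omega]; ring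
    omega
  have hapos : (0 : Int) ≤ ((2 ^ k - 2 : Nat) : Int) := by positivity
  rw [ha]
  simp only [PySem.Int.band, hapos, hbneg, if_true, if_false]
  have h5 : (((2 ^ k - 2 : Nat) : Int)).toNat = 2 ^ k - 2 := by omega
  have h6 : (-(-((2 ^ k - 1 : Nat) : Int) + 1) - 1).toNat = 2 ^ k - 3 := by
    have : ((2 ^ k - 1 : Nat) : Int) = (2 ^ k : Nat) - 1 := by push_cast [show 1 ≤ 2 ^ k by omega]; ring
    omega
  rw [h5, h6, hand]
  have h7 : (2 ^ k - 2) - (2 ^ k - 4) = 2 := by omega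
  rw [h7, shiftRight_natCast]
  norm_num [Nat.shiftRight_one]

-- every m with m &&& (m+1) = 0 is an all-ones number
theorem allones_pow (m : Nat) (h : m &&& (m + 1) = 0) : ∃ k, m = 2 ^ k - 1 := by
  induction m using Nat.strong_induction_on with
  | _ m ih =>
    by_cases hm0 : m = 0
    · exact ⟨0, by omega⟩
    · rcases Nat.mod_two_eq_zero_or_one m with he | ho
      · exfalso
        obtain ⟨a, rfl⟩ : ∃ a, m = 2 * a := ⟨m / 2, by omega⟩
        rw [show 2 * a + 1 = 2 * a + 1 from rfl, and_even_odd a a, Nat.and_self] at h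
        omega
      · obtain ⟨a, rfl⟩ : ∃ a, m = 2 * a + 1 := ⟨m / 2, by omega⟩
        have h2 : (2 * (a + 1)) &&& (2 * a + 1) = 2 * ((a + 1) &&& a) := and_even_odd (a + 1) a
        rw [show 2 * a + 1 + 1 = 2 * (a + 1) by ring, Nat.and_comm] at h
        rw [h] at h2
        have h3 : a &&& (a + 1) = 0 := by rw [Nat.and_comm]; omega
        obtain ⟨j, rfl⟩ := ih a (by omega) h3
        exact ⟨j + 1, by have : 1 ≤ 2 ^ j := Nat.one_le_two_pow; rw [pow_succ]; omega⟩

-- pointwise agreement on every element admitted by Pre_ and outside D_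
theorem step_eq (n : Int)
    (hpre : n < 0 → PySem.Int.mod n 2 = 0 ∨ (-n).toNat &&& ((-n).toNat + 1) = 0)
    (hnd : ¬ (n < -1 ∧ PySem.Int.mod n 2 ≠ 0 ∧ (-n).toNat &&& ((-n).toNat + 1) = 0)) :
    stepA n = nextNum n := by
  by_cases he : PySem.Int.mod n 2 = 0
  · unfold stepA nextNum; rw [if_pos he, if_pos he]
  · by_cases hn : 0 ≤ n
    · -- nonnegative odd: the string scan equals the bit trick
      obtain ⟨k, rfl⟩ : ∃ k : Nat, n = (k : Int) := ⟨n.toNat, by omega⟩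
      have hk : k % 2 = 1 := by
        rcases Nat.mod_two_eq_zero_or_one k with h0 | h1
        · exfalso
          apply he
          have hmc := PySem.Int.mod_natCast k 2
          rw [h0] at hmc
          exact_mod_cast hmc
        · exact h1
      have hkpos : (0 : Int) < (k : Int) := by
        have : k ≠ 0 := by omega
        exact_mod_cast Nat.pos_of_ne_zero this
      unfold stepA nextNum oddStepA
      rw [if_neg he, if_neg he]
      have hrev : ('0' :: fmtB (k : Int)).reverse = bitsLE k ++ ['0'] := by
        rw [fmtB, if_neg (by omega : ¬ ((k : Int) = 0)), if_pos hkpos, Int.toNat_natCast,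
          List.reverse_cons, binChars_reverse]
      rw [hrev]
      have hnod : '-' ∉ (scanA (bitsLE k ++ ['0'])).reverse := by
        intro hmem
        rw [List.mem_reverse] at hmem
        have hsrc : '-' ∈ bitsLE k ++ ['0'] := by
          obtain ⟨a, t, hat⟩ := List.exists_cons_of_ne_nil
            (show bitsLE k ++ ['0'] ≠ [] by simp)
          rw [hat] at hmem ⊢
          exact scanA_subset t a '-' hmem
        rcases List.mem_append.mp hsrc with h1 | h1
        · rcases bitsLE_digits k '-' h1 with h2 | h2 <;> simp at h2
        · simp at h1
      rw [parseBE_no_dash _ hnod, parseDigits_reverse, scan_value k hk, band_not k,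
        shiftRight_natCast, Nat.shiftRight_one]
    · -- negative odd admitted by Pre_ outside D_: only n = -1, where both return -1
      have hao : (-n).toNat &&& ((-n).toNat + 1) = 0 := (hpre (by omega)).resolve_left he
      have hn1 : n = -1 := by
        by_contra hne
        exact hnd ⟨by omega, he, hao⟩
      subst hn1
      have hA : stepA (-1) = -1 := by
        have := stepA_allones 1 (by omega)
        norm_num at this
        exact this
      rw [hA]
      decide

theorem pre_elem (numbers : List Int) (hpre : Pre_solution numbers)
    (hnd : ¬ D_solution numbers) (n : Int) (hmem : n ∈ numbers) :
    stepA n = nextNum n := by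
  refine step_eq n (hpre n hmem) ?_
  intro ⟨h1, h2, h3⟩
  exact hnd ⟨n, hmem, h1, h2, h3⟩

-- ===== VERDICT (by name: the statement is the Claim_ definition above) =====
theorem solution_spec : Claim_unchanged_solution := by
  intro numbers _ hpre
  unfold Spec_solution
  intro hnd
  rw [solution_eq_map]
  unfold solution_alt
  exact List.map_congr_left (pre_elem numbers hpre hnd)

theorem solution_changed : Claim_changed_solution := by
  unfold Claim_changed_solution
  refine ⟨by decide, by decide, by decide, ?_, by decide, by decide⟩
  rw [solution_eq_map]
  have h3 : ((-3 : Int)) = -((2 ^ 2 - 1 : Nat) : Int) := by norm_num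
  show [stepA (-3)] = [-3]
  rw [h3, stepA_allones 2 (by omega)]

theorem solution_tight : Claim_exact_solution := by
  intro numbers _ hpre hD heq
  obtain ⟨n, hmem, hlt, hodd, hao⟩ := hD
  obtain ⟨k, hk⟩ := allones_pow (-n).toNat hao
  have hkn : n = -((2 ^ k - 1 : Nat) : Int) := by omega
  have hk2 : 2 ≤ k := by
    rcases k with _ | _ | k
    · omega
    · norm_num at hk; omega
    · omega
  rw [solution_eq_map] at heq
  unfold solution_alt at heq
  have hpt : stepA n = nextNum n := List.map_eq_map_iff.mp heq n hmem
  rw [hkn, stepA_allones k (by omega), nextNum_allones k hk2] at hpt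
  omega
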